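-- pv_equiv track=rewrite | github.com/williamLyh/InstructDiscourse | evaluation_utils.py | labels_reduce
-- ===== SOURCE A (Python) =====
-- def labels_reduce(labels):
--     # deciding which is the leading action, based on priority rank
--     # sentence with no labels will be assign 5, the 'postprocessing' tag
--     stage_to_idx = {'preprocessing':1, 'mixing':2, 'moving':3, 'cooking':4, 'postprocessing':5, 'final':6, 'general':0}
--     labels = [label for label in labels if label!=0]
--     if labels == []:
--         return stage_to_idx['general']
--
--     if stage_to_idx['cooking'] in labels:
--         return stage_to_idx['cooking']
--
--     return labels[-1]
-- ===== SOURCE B (Python) =====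
-- def labels_reduce(labels):
--     # Argmax formulation: rank every position (cooking=4 outranks any other
--     # non-zero, zeros rank lowest; later positions break ties) and return the
--     # label of the maximal (rank, index) pair, or 0 when nothing ranks above zero.
--     best = max(enumerate(labels),
--                key=lambda il: (2 if il[1] == 4 else 1 if il[1] != 0 else 0, il[0]),
--                default=None)
--     return best[1] if best is not None and best[1] != 0 else 0
-- ===== Notes on version B (the rewrite author's own statement) =====
-- stated objective: alternative
-- what changed: Replaced A's filter-then-membership-test-then-negative-index pipeline by an argmax reduction: each position gets a lexicographic priority key (rank of the label, position), max() picks the winning pair and its label is the answer.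
import Mathlib
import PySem

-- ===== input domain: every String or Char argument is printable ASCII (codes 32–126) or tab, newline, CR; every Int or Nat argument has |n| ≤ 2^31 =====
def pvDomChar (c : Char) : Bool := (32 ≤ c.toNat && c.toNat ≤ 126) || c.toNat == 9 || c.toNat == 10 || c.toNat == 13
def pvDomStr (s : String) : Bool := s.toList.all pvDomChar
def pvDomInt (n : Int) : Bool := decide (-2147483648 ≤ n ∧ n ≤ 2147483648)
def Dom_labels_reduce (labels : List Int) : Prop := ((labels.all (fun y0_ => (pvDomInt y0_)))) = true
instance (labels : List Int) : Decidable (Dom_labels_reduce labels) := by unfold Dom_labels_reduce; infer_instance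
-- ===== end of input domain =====

-- B replaces A's filter + membership test + negative index by an argmax reduction
-- over (rank, position) priority keys (objective: alternative).


-- ===== PORT A =====
-- stage_to_idx as an association list, as in the Python
def stageToIdx : PySem.Dict String Int :=
  PySem.Dict.ofList
    [("preprocessing", 1), ("mixing", 2), ("moving", 3), ("cooking", 4),
     ("postprocessing", 5), ("final", 6), ("general", 0)]

def labels_reduce (labels : List Int) : Int :=
  let labels' := labels.filter (fun label => label != 0)
  if labels' = [] then
    PySem.Dict.getD stageToIdx "general" 0
  else if PySem.Dict.getD stageToIdx "cooking" 0 ∈ labels' then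
    PySem.Dict.getD stageToIdx "cooking" 0
  else
    -- labels'[-1]; the list is non-empty on this branch, so the default is never used
    (PySem.List.pyGet? labels' (-1)).getD 0

-- ===== PORT B =====
-- the first component of Source B's lambda key: label rank
def lrRank (l : Int) : Int := if l == 4 then 2 else if l != 0 then 1 else 0

def labels_reduce_alt (labels : List Int) : Int :=
  match PySem.List.max2? (PySem.List.enumerate labels)
      (fun il => lrRank il.2) (fun il => il.1) with
  | some best => if best.2 != 0 then best.2 else 0
  | none => 0

-- ===== PRECONDITION & SPEC =====
def Spec_labels_reduce (labels : List Int) (out : Int) : Prop := out = labels_reduce_alt labels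
instance (labels : List Int) (out : Int) : Decidable (Spec_labels_reduce labels out) := by unfold Spec_labels_reduce; infer_instance

-- ===== CLAIM (what is proved, stated in full; the proofs are below) =====
def Claim_equal_labels_reduce : Prop := ∀ (labels : List Int), Dom_labels_reduce labels → Spec_labels_reduce labels (labels_reduce labels)

-- ===== LEMMAS AND PROOFS =====

theorem cook_val : PySem.Dict.getD stageToIdx "cooking" 0 = 4 := by decide

theorem gen_val : PySem.Dict.getD stageToIdx "general" 0 = 0 := by decide

-- the value A's branch structure computes, used as the common characterization
def lrVal (xs : List Int) : Int :=
  if (4 : Int) ∈ xs then 4 else ((xs.filter (fun x => x != 0)).getLast?).getD 0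

-- one step of max2?'s fold on a singleton appended at the right
theorem max2?_append_singleton {α κ₁ κ₂ : Type} [LinearOrder κ₁] [LinearOrder κ₂]
    (l : List α) (x : α) (k1 : α → κ₁) (k2 : α → κ₂) :
    PySem.List.max2? (l ++ [x]) k1 k2 =
      (match PySem.List.max2? l k1 k2 with
       | none => some x
       | some m => if k1 m < k1 x ∨ (¬ k1 x < k1 m ∧ k2 m < k2 x) then some x else some m) := by
  unfold PySem.List.max2?
  rw [List.foldl_append]
  generalize List.foldl _ none l = r
  cases r with
  | none => simp
  | some m =>
    simp only [List.foldl]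
    by_cases h : k1 m < k1 x ∨ (¬ k1 x < k1 m ∧ k2 m < k2 x)
    · rw [if_pos (by simpa using h), if_pos h]
    · rw [if_neg (by simpa using h), if_neg h]

-- the argmax over enumerate always selects an in-range index whose label is lrVal
theorem max2?_enumerate_char (xs : List Int) (h : xs ≠ []) :
    ∃ j : Int, PySem.List.max2? (PySem.List.enumerate xs)
        (fun il => lrRank il.2) (fun il => il.1) = some (j, lrVal xs) ∧ j < (xs.length : Int) := by
  induction xs using List.reverseRecOn with
  | nil => exact absurd rfl h
  | append_singleton xs y ih =>
    rw [show PySem.List.enumerate (xs ++ [y]) =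
          PySem.List.enumerate xs ++ [((xs.length : Int), y)] by
        rw [PySem.List.enumerate_append]; norm_num [PySem.List.enumerate]]
    rw [max2?_append_singleton]
    rcases eq_or_ne xs [] with hnil | hne
    · subst hnil
      refine ⟨0, ?_, by simp⟩
      simp only [PySem.List.enumerate, PySem.List.max2?, List.foldl]
      rcases eq_or_ne y 4 with h4 | h4
      · simp [lrVal, h4]
      · rcases eq_or_ne y 0 with h0 | h0
        · simp [lrVal, h0]
        · simp [lrVal, h0, Ne.symm h4]
    · obtain ⟨j, hM, hj⟩ := ih hne
      rw [hM]
      dsimp only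
      by_cases hlt : lrRank y < lrRank (lrVal xs)
      · -- old best survives
        refine ⟨j, ?_, by rw [List.length_append]; push_cast; omega⟩
        rw [if_neg (by omega)]
        congr 2
        -- lrVal (xs ++ [y]) = lrVal xs when rank y < rank (lrVal xs)
        have hy0 : lrRank y < 2 := lt_of_lt_of_le hlt (by unfold lrRank; split_ifs <;> omega)
        have hy4 : y ≠ 4 := by intro hy; rw [hy] at hy0; simp [lrRank] at hy0
        unfold lrVal at *
        by_cases h4 : (4 : Int) ∈ xs
        · simp [h4, List.mem_append]
        · -- rank (lrVal xs) ≥ 1 forces filter nonempty and y = 0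
          have hv : lrRank (if (4:Int) ∈ xs then 4 else ((xs.filter (fun x => x != 0)).getLast?).getD 0) ≤ 1 := by
            rw [if_neg h4]
            cases hgl : (xs.filter (fun x => x != 0)).getLast? with
            | none => simp [lrRank]
            | some t =>
              have ht : t ∈ xs.filter (fun x => x != 0) := List.mem_of_getLast? hgl
              have ht4 : t ≠ 4 := fun hc => h4 (by simpa [hc] using (List.mem_filter.mp ht).1)
              simp only [Option.getD_some, lrRank]
              split_ifs with h1 h2
              · exact absurd (by simpa using h1) ht4
              · omega
              · omega
          have hy : lrRank y ≤ 0 := by omega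
          have hy0' : y = 0 := by
            by_contra hc
            simp [lrRank, hy4, hc] at hy
          subst hy0'
          simp [h4, List.filter_append]
      · -- the new element wins (strictly larger rank, or equal rank and larger index)
        refine ⟨(xs.length : Int), ?_, by
          rw [List.length_append, List.length_singleton]; push_cast; omega⟩
        rw [if_pos (Or.inr ⟨hlt, hj⟩)]
        congr 2
        -- lrVal (xs ++ [y]) = y when rank (lrVal xs) ≤ rank y
        have hle : lrRank (lrVal xs) ≤ lrRank y := le_of_not_gt hlt
        unfold lrVal at *
        rcases eq_or_ne y 4 with h4 | h4
        · simp [h4]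
        · have hy1 : lrRank y ≤ 1 := by
            unfold lrRank
            rw [if_neg (by simpa using h4)]
            split_ifs <;> omega
          have h4xs : (4 : Int) ∉ xs := by
            intro hc
            rw [if_pos hc] at hle
            have h44 : lrRank (4 : Int) = 2 := by decide
            omega
          rcases eq_or_ne y 0 with h0 | h0
          · -- rank y = 0 forces the filtered list empty
            have hr0 : lrRank y = 0 := by simp [lrRank, h0]
            rw [if_neg h4xs] at hle
            have hnil : xs.filter (fun x => x != 0) = [] := by
              cases hgl : (xs.filter (fun x => x != 0)).getLast? with
              | none => exact List.getLast?_eq_none_iff.mp hgl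
              | some t =>
                exfalso
                have ht : t ∈ xs.filter (fun x => x != 0) := List.mem_of_getLast? hgl
                have ht0 : t ≠ 0 := by simpa using (List.mem_filter.mp ht).2
                rw [hgl, Option.getD_some] at hle
                have ht1 : (1:Int) ≤ lrRank t := by
                  unfold lrRank
                  split_ifs with a b
                  · omega
                  · omega
                  · exact absurd (by simpa using b) ht0
                omega
            simp [h0, List.mem_append, h4xs, List.filter_append, hnil]
          · simp [List.mem_append, h4xs, Ne.symm h4, List.filter_append, h0]

-- ===== VERDICT (by name: the statement is the Claim_ definition above) =====
theorem labels_reduce_spec : Claim_equal_labels_reduce := by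
  intro labels _
  unfold Spec_labels_reduce labels_reduce labels_reduce_alt
  rcases eq_or_ne labels [] with hnil | hne
  · subst hnil; simp [PySem.List.enumerate, PySem.List.max2?, gen_val]
  · obtain ⟨j, hM, _⟩ := max2?_enumerate_char labels hne
    rw [hM]
    simp only [cook_val, gen_val]
    cases he : labels.filter (fun x => x != 0) with
    | nil =>
      have h4 : (4 : Int) ∉ labels := by
        intro hc
        have : (4 : Int) ∈ labels.filter (fun x => x != 0) := List.mem_filter.mpr ⟨hc, by decide⟩
        simp [he] at this
      simp [lrVal, he, h4]
    | cons z zs =>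
      have hme : (4 : Int) ∈ labels ↔ (4 : Int) ∈ z :: zs := by
        rw [← he]
        constructor
        · exact fun hc => List.mem_filter.mpr ⟨hc, by decide⟩
        · exact fun hc => (List.mem_filter.mp hc).1
      by_cases h4 : (4 : Int) ∈ z :: zs
      · simp [lrVal, hme.mpr h4, h4]
      · have h4l : (4 : Int) ∉ labels := fun hc => h4 (hme.mp hc)
        have hglm : (z :: zs).getLast (by simp) ∈ labels.filter (fun x => x != 0) := by
          rw [he]; exact List.getLast_mem _
        have hgl0 : (z :: zs).getLast (by simp) ≠ 0 := by
          simpa using (List.mem_filter.mp hglm).2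
        simp [lrVal, h4l, he, h4, PySem.List.pyGet?_neg_one,
          List.getLast?_eq_some_getLast, hgl0]
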